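-- pv_equiv track=rewrite | github.com/p-seonggeun/algorithm | 백준/Silver/17615. 볼 모으기/볼 모으기.py | right_blue
-- ===== SOURCE A (Python) =====
-- def right_blue(balls) :
--     count = 0
--     flag = False
--     for i in range(len(balls) - 1, -1, -1) :
--         if balls[i] == 'R' :
--             flag = True
--             continue
--         if flag == True :
--             if balls[i] == 'B' :
--                 count += 1
--     return count
-- ===== SOURCE B (Python) =====
-- def right_blue(balls):
--     last_r = -1
--     for i, c in enumerate(balls):
--         if c == 'R':
--             last_r = i
--     if last_r == -1:
--         return 0
--     return sum(1 for c in balls[:last_r] if c == 'B')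
-- ===== Notes on version B (the rewrite author's own statement) =====
-- stated objective: simpler
-- what changed: Replaces the armed reverse-scan with a flag by locating the rightmost 'R' in a forward pass and counting 'B' in the prefix strictly before it.
import Mathlib
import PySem

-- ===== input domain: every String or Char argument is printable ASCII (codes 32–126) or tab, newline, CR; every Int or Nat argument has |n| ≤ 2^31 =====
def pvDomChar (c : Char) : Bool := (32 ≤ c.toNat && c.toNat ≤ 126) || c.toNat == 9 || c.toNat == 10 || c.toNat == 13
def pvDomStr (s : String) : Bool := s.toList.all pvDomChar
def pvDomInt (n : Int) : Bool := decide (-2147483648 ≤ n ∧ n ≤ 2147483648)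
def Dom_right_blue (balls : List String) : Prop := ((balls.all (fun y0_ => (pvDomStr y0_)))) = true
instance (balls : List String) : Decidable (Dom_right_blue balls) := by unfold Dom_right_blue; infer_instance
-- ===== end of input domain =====

-- B is a simpler decomposition: locate the rightmost 'R' forward, then count 'B' in the prefix before it (A: armed reverse scan with a flag). Same O(n) cost.

-- ===== PORT A =====
-- loop body of A's reverse scan: arm the flag on 'R', count 'B' once armed
def stepA (s : Int × Bool) (c : String) : Int × Bool :=
  if c = "R" then (s.1, true)
  else if s.2 = true then ((if c = "B" then s.1 + 1 else s.1), s.2)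
  else s

-- A iterates i = len-1 … 0 over balls[i]; ported as a fold over balls.reverse with the same (count, flag) state
def right_blue (balls : List String) : Int :=
  (balls.reverse.foldl stepA ((0 : Int), false)).1

-- ===== PORT B =====
-- last_r accumulator of Source B's enumerate loop
def lastR (balls : List String) : Int :=
  (PySem.List.enumerate balls).foldl (fun acc p => if p.2 = "R" then p.1 else acc) (-1)

-- body of Source B's sum(1 for c in … if c == 'B')
def countBacc (acc : Int) (c : String) : Int := if c = "B" then acc + 1 else acc

def right_blue_alt (balls : List String) : Int :=
  let L := lastR balls
  if L = -1 then 0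
  else (PySem.List.slice balls none (some L)).foldl countBacc 0

-- ===== PRECONDITION & SPEC =====
def Spec_right_blue (balls : List String) (out : Int) : Prop := out = right_blue_alt balls
instance (balls : List String) (out : Int) : Decidable (Spec_right_blue balls out) := by unfold Spec_right_blue; infer_instance

-- ===== CLAIM (what is proved, stated in full; the proofs are below) =====
def Claim_equal_right_blue : Prop := ∀ (balls : List String), Dom_right_blue balls → Spec_right_blue balls (right_blue balls)

-- ===== LEMMAS AND PROOFS =====

lemma foldl_countBacc (l : List String) (n : Int) :
    l.foldl countBacc n = n + ((l.filter (fun c => c = "B")).length : Int) := by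
  induction l generalizing n with
  | nil => simp
  | cons c t ih =>
      by_cases hB : c = "B"
      · simp only [List.foldl_cons, List.filter_cons, countBacc, hB, ih]
        simp
        push_cast
        ring
      · simp [List.foldl_cons, List.filter_cons, countBacc, hB, ih]

lemma foldA_true (rl : List String) (n : Int) :
    rl.foldl stepA (n, true) = (n + ((rl.filter (fun c => c = "B")).length : Int), true) := by
  induction rl generalizing n with
  | nil => simp
  | cons c t ih =>
      rw [List.foldl_cons]
      by_cases hR : c = "R"
      · have hs : stepA (n, true) c = (n, true) := by simp [stepA, hR]
        rw [hs, ih]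
        have : c ≠ "B" := by simp [hR]
        simp [List.filter_cons, this]
      · by_cases hB : c = "B"
        · have hs : stepA (n, true) c = (n + 1, true) := by simp [stepA, hR, hB]
          rw [hs, ih]
          simp [List.filter_cons, hB]
          push_cast
          ring
        · have hs : stepA (n, true) c = (n, true) := by simp [stepA, hR, hB]
          rw [hs, ih]
          simp [List.filter_cons, hB]

lemma lastR_append (l : List String) (c : String) :
    lastR (l ++ [c]) = if c = "R" then (l.length : Int) else lastR l := by
  unfold lastR
  rw [PySem.List.enumerate_append]
  simp [PySem.List.enumerate_cons]

lemma lastR_bounds (l : List String) : -1 ≤ lastR l ∧ lastR l < (l.length : Int) := by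
  induction l using List.reverseRecOn with
  | nil => simp [lastR, PySem.List.enumerate_nil]
  | append_singleton t c ih =>
      rw [lastR_append]
      rcases ih with ⟨h1, h2⟩
      split_ifs <;> simp <;> omega

lemma right_blue_append (l : List String) (c : String) :
    right_blue (l ++ [c])
      = if c = "R" then ((l.filter (fun c => c = "B")).length : Int) else right_blue l := by
  unfold right_blue
  rw [List.reverse_append]
  simp only [List.reverse_singleton, List.singleton_append, List.foldl_cons]
  by_cases hR : c = "R"
  · have hs : stepA (0, false) c = (0, true) := by simp [stepA, hR]
    rw [hs, foldA_true]
    simp [hR, List.filter_reverse]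
  · have hs : stepA (0, false) c = (0, false) := by simp [stepA, hR]
    rw [hs]
    simp [hR]

theorem right_blue_eq_alt (balls : List String) : right_blue balls = right_blue_alt balls := by
  induction balls using List.reverseRecOn with
  | nil => decide
  | append_singleton l c ih =>
      rw [right_blue_append]
      unfold right_blue_alt
      rw [lastR_append]
      by_cases hR : c = "R"
      · subst hR
        have hlen : ((l.length : Int)) ≠ -1 := by omega
        rw [if_pos rfl, if_pos rfl, if_neg hlen,
          PySem.List.slice_to_natCast, List.take_left, foldl_countBacc]
        simp
      · simp only [hR, if_neg hR, ite_false]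
        rw [ih]
        unfold right_blue_alt
        by_cases hL : lastR l = -1
        · simp [hL]
        · have hb := lastR_bounds l
          have h0 : 0 ≤ lastR l := by omega
          have hs : PySem.List.slice (l ++ [c]) none (some (lastR l))
              = PySem.List.slice l none (some (lastR l)) := by
            rw [PySem.List.slice_to (l ++ [c]) h0, PySem.List.slice_to l h0,
              List.take_append_of_le_length (by omega)]
          simp [hL, hs]

-- ===== VERDICT (by name: the statement is the Claim_ definition above) =====
theorem right_blue_spec : Claim_equal_right_blue := by
  intro balls _
  unfold Spec_right_blue
  exact right_blue_eq_alt balls
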